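-- pv_equiv track=rewrite | github.com/kahleeeb3/ESP32Display | photo.py | make_bitmap_string
-- ===== SOURCE A (Python) =====
-- OLED_WIDTH = 128
--
-- OLED_HEIGHT = 64
--
-- def make_bitmap_string(bitmap):
--     bitmap_string = f"#ifndef SPLASH\n#define LOGO_WIDTH {OLED_WIDTH}\n#define LOGO_HEIGHT {OLED_HEIGHT}\n"
--     bitmap_string += "const uint8_t PROGMEM logo_bmp[] = {\n"
--     for row in bitmap:
--         bitmap_string += "\t"
--         for index, pixel in enumerate(row):
--             if index == 0:
--                 bitmap_string += "0b"
--             elif index % 8 == 0: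
--                 bitmap_string += ",0b"
--             bitmap_string += f"{pixel}"
--
--         bitmap_string += ",\n"
--     bitmap_string += "};\n#endif"
--     return bitmap_string
-- ===== SOURCE B (Python) =====
-- OLED_WIDTH = 128
--
-- OLED_HEIGHT = 64
--
-- def make_bitmap_string(bitmap):
--     header = (f"#ifndef SPLASH\n#define LOGO_WIDTH {OLED_WIDTH}\n#define LOGO_HEIGHT {OLED_HEIGHT}\n"
--               "const uint8_t PROGMEM logo_bmp[] = {\n")
--     rows = []
--     for row in bitmap:
--         body = ",".join("0b" + "".join(f"{p}" for p in row[i:i + 8])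
--                         for i in range(0, len(row), 8))
--         rows.append("\t" + body + ",\n")
--     return header + "".join(rows) + "};\n#endif"
-- ===== Notes on version B (the rewrite author's own statement) =====
-- stated objective: simpler
-- what changed: B replaces A's stateful per-pixel loop with its index%8 boundary test by slicing each row into explicit 8-pixel groups, formatting each group as one '0b...' byte string and joining groups with commas.
import Mathlib
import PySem

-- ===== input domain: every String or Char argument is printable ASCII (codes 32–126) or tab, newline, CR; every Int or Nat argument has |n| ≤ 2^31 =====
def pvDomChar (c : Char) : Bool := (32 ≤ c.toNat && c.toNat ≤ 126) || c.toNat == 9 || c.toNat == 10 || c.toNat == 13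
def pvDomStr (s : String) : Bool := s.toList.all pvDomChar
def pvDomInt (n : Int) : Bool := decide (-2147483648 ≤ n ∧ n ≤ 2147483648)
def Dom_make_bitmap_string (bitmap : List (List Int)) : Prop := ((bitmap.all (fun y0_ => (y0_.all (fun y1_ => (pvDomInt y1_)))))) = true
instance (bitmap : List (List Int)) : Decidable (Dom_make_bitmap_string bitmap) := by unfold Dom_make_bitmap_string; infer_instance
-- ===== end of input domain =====

-- B replaces A's per-pixel index%8 boundary test with explicit chunking into 8-pixel
-- groups joined by ','; objective: simpler (same cost, clearer decomposition).


def OLED_WIDTH : Int := 128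

def OLED_HEIGHT : Int := 64

-- ===== PORT A =====
def make_bitmap_string (bitmap : List (List Int)) : String :=
  let s0 : String := "#ifndef SPLASH\n#define LOGO_WIDTH " ++ PySem.Int.toStr OLED_WIDTH
                      ++ "\n#define LOGO_HEIGHT " ++ PySem.Int.toStr OLED_HEIGHT ++ "\n"
  let s1 := s0 ++ "const uint8_t PROGMEM logo_bmp[] = {\n"
  let s2 := bitmap.foldl (fun s row =>
    let s := s ++ "\t"
    let s := (PySem.List.enumerate row).foldl (fun s ip =>
      let s := if ip.1 == 0 then s ++ "0b"
               else if PySem.Int.mod ip.1 8 == 0 then s ++ ",0b" else s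
      s ++ PySem.Int.toStr ip.2) s
    s ++ ",\n") s1
  s2 ++ "};\n#endif"

-- ===== PORT B =====
def pvByte (g : List Int) : String := "0b" ++ PySem.Str.join "" (g.map PySem.Int.toStr)

def pvRowStr (row : List Int) : String :=
  let body := PySem.Str.join ","
    (((PySem.List.pyRange 0 (row.length : Int) 8).map
        (fun i => PySem.List.slice row (some i) (some (i + 8)))).map pvByte)
  "\t" ++ body ++ ",\n"

def make_bitmap_string_alt (bitmap : List (List Int)) : String :=
  let header : String := "#ifndef SPLASH\n#define LOGO_WIDTH " ++ PySem.Int.toStr OLED_WIDTH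
                      ++ "\n#define LOGO_HEIGHT " ++ PySem.Int.toStr OLED_HEIGHT ++ "\n"
                      ++ "const uint8_t PROGMEM logo_bmp[] = {\n"
  header ++ PySem.Str.join "" (bitmap.map pvRowStr) ++ "};\n#endif"

-- ===== PRECONDITION & SPEC =====
def Spec_make_bitmap_string (bitmap : List (List Int)) (out : String) : Prop := out = make_bitmap_string_alt bitmap
instance (bitmap : List (List Int)) (out : String) : Decidable (Spec_make_bitmap_string bitmap out) := by unfold Spec_make_bitmap_string; infer_instance

-- ===== CLAIM (what is proved, stated in full; the proofs are below) =====
def Claim_equal_make_bitmap_string : Prop := ∀ (bitmap : List (List Int)), Dom_make_bitmap_string bitmap → Spec_make_bitmap_string bitmap (make_bitmap_string bitmap)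

-- ===== LEMMAS AND PROOFS =====

-- A's inner per-pixel step, named for the proofs
def pvStep (s : String) (ip : Int × Int) : String :=
  let s := if ip.1 == 0 then s ++ "0b"
           else if PySem.Int.mod ip.1 8 == 0 then s ++ ",0b" else s
  s ++ PySem.Int.toStr ip.2

-- A's inner loop body starting from the empty string
def pvH (l : List (Int × Int)) : String := l.foldl pvStep ""

-- proof-side chunking of a row into groups of 8
def pvChunks (l : List Int) : List (List Int) :=
  if h : l = [] then [] else
    have : (l.drop 8).length < l.length := by
      cases l with
      | nil => exact absurd rfl h
      | cons x xs => simp [List.length_drop]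
    l.take 8 :: pvChunks (l.drop 8)
termination_by l.length

-- trailing groups, each preceded by a comma
def pvTail (cs : List (List Int)) : String :=
  PySem.Str.join "" (cs.map (fun c => "," ++ pvByte c))

theorem pv_join_nil (sep : String) : PySem.Str.join sep [] = "" := by
  apply String.toList_inj.mp; simp [PySem.Str.toList_join, PySem.Chars.join_nil]

theorem pv_join_empty_cons (p : String) (ps : List String) :
    PySem.Str.join "" (p :: ps) = p ++ PySem.Str.join "" ps := by
  apply String.toList_inj.mp
  cases ps with
  | nil => simp [PySem.Str.toList_join, PySem.Chars.join_singleton, PySem.Chars.join_nil]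
  | cons q qs => simp [PySem.Str.toList_join, PySem.Chars.join_cons_cons]

theorem pv_join_comma_cons_cons (p q : String) (ps : List String) :
    PySem.Str.join "," (p :: q :: ps) = p ++ "," ++ PySem.Str.join "," (q :: ps) := by
  apply String.toList_inj.mp
  simp [PySem.Str.toList_join, PySem.Chars.join_cons_cons]

theorem pvStep_shift (s : String) (ip : Int × Int) : pvStep s ip = s ++ pvStep "" ip := by
  unfold pvStep; split_ifs <;> simp [String.append_assoc]

theorem pvH_shift (l : List (Int × Int)) (s : String) :
    l.foldl pvStep s = s ++ pvH l := by
  induction l generalizing s with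
  | nil => simp [pvH]
  | cons x l ih =>
    simp only [List.foldl_cons, pvH]
    rw [ih (pvStep s x), ih (pvStep "" x), pvStep_shift, String.append_assoc]

theorem pvH_cons (x : Int × Int) (l : List (Int × Int)) :
    pvH (x :: l) = pvStep "" x ++ pvH l := by
  simp only [pvH, List.foldl_cons]; rw [pvH_shift, pvStep_shift]; simp [pvH]

theorem pvH_append (a b : List (Int × Int)) : pvH (a ++ b) = pvH a ++ pvH b := by
  simp only [pvH, List.foldl_append]; rw [pvH_shift]; rfl

theorem pvStep_mid (k p : Int) (h1 : k ≠ 0) (h2 : ¬ (8 ∣ k)) :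
    pvStep "" (k, p) = PySem.Int.toStr p := by simp [pvStep, h1, h2]

theorem pvStep_zero (p : Int) : pvStep "" (0, p) = "0b" ++ PySem.Int.toStr p := by simp [pvStep]

theorem pvStep_eight (k p : Int) (h1 : k ≠ 0) (h2 : 8 ∣ k) :
    pvStep "" (k, p) = ",0b" ++ PySem.Int.toStr p := by simp [pvStep, h1, h2]

theorem pvTail_cons (c : List Int) (cs : List (List Int)) :
    pvTail (c :: cs) = "," ++ pvByte c ++ pvTail cs := by
  simp only [pvTail, List.map_cons]
  rw [pv_join_empty_cons]

theorem pvChunks_nil : pvChunks [] = [] := by rw [pvChunks]; simp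

theorem pvChunks_cons (row : List Int) (h : row ≠ []) :
    pvChunks row = row.take 8 :: pvChunks (row.drop 8) := by
  rw [pvChunks]; simp [h]

-- indices strictly inside a group produce no prefix
theorem pvH_digits (l : List Int) (m j : Int) (_hm : 0 ≤ m) (hj : 1 ≤ j)
    (hlen : j + l.length ≤ 8) :
    pvH (PySem.List.enumerate l (8 * m + j)) = PySem.Str.join "" (l.map PySem.Int.toStr) := by
  induction l generalizing j with
  | nil => simp [pvH, pv_join_nil, PySem.List.enumerate_nil]
  | cons p l ih =>
    simp only [List.length_cons] at hlen
    push_cast at hlen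
    rw [PySem.List.enumerate_cons, pvH_cons,
        pvStep_mid _ _ (by omega) (by omega),
        List.map_cons, pv_join_empty_cons,
        show 8 * m + j + 1 = 8 * m + (j + 1) by ring,
        ih (j + 1) (by omega) (by omega)]

-- a whole group at a multiple-of-8 index
theorem pvH_chunk (c : List Int) (m : Int) (hm : 0 ≤ m) (hne : c ≠ []) (hlen : c.length ≤ 8) :
    pvH (PySem.List.enumerate c (8 * m)) =
      (if m = 0 then "0b" else ",0b") ++ PySem.Str.join "" (c.map PySem.Int.toStr) := by
  cases c with
  | nil => exact absurd rfl hne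
  | cons p l =>
    simp only [List.length_cons] at hlen
    rw [PySem.List.enumerate_cons, pvH_cons, List.map_cons, pv_join_empty_cons,
        pvH_digits l m 1 hm (by omega) (by omega)]
    by_cases h0 : m = 0
    · subst h0; norm_num [pvStep_zero, String.append_assoc]
    · rw [pvStep_eight _ _ (by omega) ⟨m, rfl⟩]
      simp [h0, String.append_assoc]

theorem pvH_tail_aux (n : Nat) : ∀ (row : List Int) (m : Int), row.length ≤ n → 1 ≤ m → row ≠ [] →
    pvH (PySem.List.enumerate row (8 * m)) = pvTail (pvChunks row) := by
  induction n with
  | zero => intro row m hn _ hne; cases row with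
    | nil => exact absurd rfl hne
    | cons p l => simp at hn
  | succ n ih =>
    intro row m hn hm hne
    have hcomma : (",0b" : String) = "," ++ "0b" := by decide
    by_cases hle : row.length ≤ 8
    · have hd : row.drop 8 = [] := List.drop_eq_nil_of_le hle
      rw [pvChunks_cons row hne, hd, pvChunks_nil, List.take_of_length_le hle,
          pvH_chunk row m (by omega) hne hle, pvTail_cons]
      simp only [pvTail, List.map_nil, pv_join_nil, pvByte, if_neg (show ¬ m = 0 by omega)]
      rw [hcomma, String.append_assoc]
      simp
    · have htake : (row.take 8).length = 8 := by simp [List.length_take]; omega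
      have hsplit : pvH (PySem.List.enumerate row (8 * m)) =
          pvH (PySem.List.enumerate (row.take 8) (8 * m)) ++
          pvH (PySem.List.enumerate (row.drop 8) (8 * m + (row.take 8).length)) := by
        conv_lhs => rw [← List.take_append_drop 8 row]
        rw [PySem.List.enumerate_append, pvH_append]
      rw [hsplit, htake,
          show (8 * m + (8 : Nat) : Int) = 8 * (m + 1) by push_cast; ring,
          pvH_chunk (row.take 8) m (by omega) (by simp only [ne_eq, ← List.length_eq_zero_iff, List.length_take]; omega) (by omega),
          ih (row.drop 8) (m + 1) (by simp [List.length_drop]; omega) (by omega)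
             (by simp only [ne_eq, ← List.length_eq_zero_iff, List.length_drop]; omega),
          pvChunks_cons row hne, pvTail_cons]
      simp only [pvByte, if_neg (show ¬ m = 0 by omega), String.append_assoc]
      rw [hcomma, String.append_assoc]

theorem pvH_head (row : List Int) (hne : row ≠ []) :
    pvH (PySem.List.enumerate row 0) = pvByte (row.take 8) ++ pvTail (pvChunks (row.drop 8)) := by
  by_cases hle : row.length ≤ 8
  · have hd : row.drop 8 = [] := List.drop_eq_nil_of_le hle
    have h0 : pvH (PySem.List.enumerate row (8 * 0)) =
        (if (0 : Int) = 0 then "0b" else ",0b") ++ PySem.Str.join "" (row.map PySem.Int.toStr) :=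
      pvH_chunk row 0 le_rfl hne hle
    simp only [mul_zero] at h0
    rw [h0, hd, pvChunks_nil, List.take_of_length_le hle]
    simp [pvTail, pv_join_nil, pvByte]
  · have htake : (row.take 8).length = 8 := by simp [List.length_take]; omega
    have hsplit : pvH (PySem.List.enumerate row 0) =
        pvH (PySem.List.enumerate (row.take 8) 0) ++
        pvH (PySem.List.enumerate (row.drop 8) (0 + (row.take 8).length)) := by
      conv_lhs => rw [← List.take_append_drop 8 row]
      rw [PySem.List.enumerate_append, pvH_append]
    have h0 : pvH (PySem.List.enumerate (row.take 8) (8 * 0)) =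
        (if (0 : Int) = 0 then "0b" else ",0b") ++
          PySem.Str.join "" ((row.take 8).map PySem.Int.toStr) :=
      pvH_chunk (row.take 8) 0 le_rfl (by simp only [ne_eq, ← List.length_eq_zero_iff, List.length_take]; omega) (by omega)
    simp only [mul_zero] at h0
    rw [hsplit, htake, show ((0 : Int) + (8 : Nat)) = 8 * 1 by norm_num, h0,
        pvH_tail_aux row.length (row.drop 8) 1 (by simp [List.length_drop]) le_rfl
          (by simp only [ne_eq, ← List.length_eq_zero_iff, List.length_drop]; omega)]
    simp [pvByte, String.append_assoc]

theorem pv_join_comma (c : List Int) (cs : List (List Int)) :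
    PySem.Str.join "," ((c :: cs).map pvByte) = pvByte c ++ pvTail cs := by
  induction cs generalizing c with
  | nil => simp [pvTail, pv_join_nil]
           apply String.toList_inj.mp
           simp [PySem.Str.toList_join, PySem.Chars.join_singleton]
  | cons d cs ih =>
    rw [List.map_cons, List.map_cons, pv_join_comma_cons_cons, ← List.map_cons, ih d,
        pvTail_cons]
    simp [String.append_assoc]

theorem pvChunks_closed (n : Nat) : ∀ (row : List Int), row.length ≤ n →
    pvChunks row = (List.range ((row.length + 7) / 8)).map
      (fun k => (row.drop (8 * k)).take 8) := by
  induction n with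
  | zero => intro row hn
            have : row = [] := by cases row <;> simp_all
            subst this; simp [pvChunks_nil]
  | succ n ih =>
    intro row hn
    cases hrow : row with
    | nil => simp [pvChunks_nil]
    | cons p l =>
      rw [← hrow]
      have hne : row ≠ [] := by simp [hrow]
      have hpos : 1 ≤ row.length := by simp [hrow]
      have hq : (row.length + 7) / 8 = ((row.drop 8).length + 7) / 8 + 1 := by
        simp [List.length_drop]; omega
      rw [pvChunks_cons row hne, ih (row.drop 8) (by simp [List.length_drop]; omega),
          hq, List.range_succ_eq_map, List.map_cons, List.map_map]
      have ht : ∀ k ∈ List.range (((row.drop 8).length + 7) / 8),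
          ((fun k => List.take 8 (List.drop (8 * k) row)) ∘ Nat.succ) k
            = List.take 8 (List.drop (8 * k) (List.drop 8 row)) := by
        intro k hk
        simp only [Function.comp_apply, List.drop_drop]
        have h : 8 * Nat.succ k = 8 * k + 8 := by omega
        rw [h, Nat.add_comm]
      rw [List.map_congr_left ht]
      simp

theorem pvChunks_eq_groups (row : List Int) :
    (PySem.List.pyRange 0 (row.length : Int) 8).map
        (fun i => PySem.List.slice row (some i) (some (i + 8))) = pvChunks row := by
  rw [pvChunks_closed row.length row le_rfl,
      PySem.List.pyRange_of_pos 0 (row.length : Int) (by norm_num), List.map_map]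
  by_cases h0 : row.length = 0
  · simp [h0]
  · have hK : (if (0 : Int) < (row.length : Int)
        then (((row.length : Int) - 0 + 8 - 1) / 8).toNat else 0) = (row.length + 7) / 8 := by
      rw [if_pos (by exact_mod_cast Nat.pos_of_ne_zero h0)]
      omega
    rw [hK]
    refine List.map_congr_left ?_
    intro k hk
    simp only [Function.comp_apply]
    have hidx : (0 : Int) + 8 * (k : Int) = ((8 * k : Nat) : Int) := by push_cast; ring
    have hidx8 : ((8 * k : Nat) : Int) + 8 = ((8 * k : Nat) : Int) + ((8 : Nat) : Int) := by
      norm_num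
    rw [hidx, hidx8, PySem.List.slice_natCast_add]

theorem pvRow_eq (row : List Int) :
    pvH (PySem.List.enumerate row 0) =
      PySem.Str.join "," ((pvChunks row).map pvByte) := by
  cases hrow : row with
  | nil => simp [pvChunks_nil, pv_join_nil, pvH, PySem.List.enumerate_nil]
  | cons p l =>
    rw [← hrow]
    have hne : row ≠ [] := by simp [hrow]
    rw [pvChunks_cons row hne, List.map_cons, ← List.map_cons, pv_join_comma,
        pvH_head row hne]

theorem pvRowStr_eq (r : List Int) :
    pvRowStr r = ("\t" ++ pvH (PySem.List.enumerate r 0)) ++ ",\n" := by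
  show ("\t" ++ PySem.Str.join ","
    (((PySem.List.pyRange 0 (r.length : Int) 8).map
        (fun i => PySem.List.slice r (some i) (some (i + 8)))).map pvByte)) ++ ",\n" = _
  rw [pvChunks_eq_groups, ← pvRow_eq]

theorem pvOuter (rows : List (List Int)) (s : String) :
    rows.foldl (fun s row =>
        ((PySem.List.enumerate row).foldl pvStep (s ++ "\t")) ++ ",\n") s
      = s ++ PySem.Str.join "" (rows.map pvRowStr) := by
  induction rows generalizing s with
  | nil => simp [pv_join_nil]
  | cons r rs ih =>
    rw [List.foldl_cons, ih, List.map_cons, pv_join_empty_cons, pvH_shift, pvRowStr_eq]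
    simp [String.append_assoc]

-- ===== VERDICT (by name: the statement is the Claim_ definition above) =====
theorem make_bitmap_string_spec : Claim_equal_make_bitmap_string := by
  intro bitmap _
  show make_bitmap_string bitmap = make_bitmap_string_alt bitmap
  show (bitmap.foldl (fun s row =>
        ((PySem.List.enumerate row).foldl pvStep (s ++ "\t")) ++ ",\n")
      ("#ifndef SPLASH\n#define LOGO_WIDTH " ++ PySem.Int.toStr OLED_WIDTH
        ++ "\n#define LOGO_HEIGHT " ++ PySem.Int.toStr OLED_HEIGHT ++ "\n"
        ++ "const uint8_t PROGMEM logo_bmp[] = {\n")) ++ "};\n#endif"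
    = make_bitmap_string_alt bitmap
  rw [pvOuter]
  rfl
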